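-- pv_equiv track=rewrite | github.com/ablab/nerpa | src/nerpa_pipeline/splitter.py | split_by_single_domain_orf
-- ===== SOURCE A (Python) =====
-- def split_by_single_domain_orf(BGCs, orf_ori, orf_domains):
--     def is_removable(orf):
--         if (len(orf_domains[orf]) == 2) and ("A" in orf_domains[orf]) and ("PCP" in orf_domains[orf]):
--             return True
--         if (len(orf_domains[orf]) == 1):
--             return  True
--         return False
--
--     res_bgcs = []
--     for BGC in BGCs:
--         cur_i = 0
--         for i in range(len(BGC)):
--             orf = BGC[i]
--             if is_removable(orf):
--                 if i != cur_i:
--                     res_bgcs.append(BGC[cur_i:i])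
--                 cur_i = i + 1
--         if cur_i != len(BGC):
--             res_bgcs.append(BGC[cur_i:len(BGC)])
--
--     return res_bgcs
-- ===== SOURCE B (Python) =====
-- def split_by_single_domain_orf(BGCs, orf_ori, orf_domains):
--     def is_removable(orf):
--         ds = orf_domains[orf]
--         return len(ds) == 1 or (len(ds) == 2 and "A" in ds and "PCP" in ds)
--
--     res = []
--     for BGC in BGCs:
--         rest = list(BGC)
--         while rest:
--             if is_removable(rest[0]):
--                 rest = rest[1:]
--             else:
--                 seg = []
--                 while rest and not is_removable(rest[0]):
--                     seg.append(rest[0])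
--                     rest = rest[1:]
--                 res.append(seg)
--     return res
-- ===== Notes on version B (the rewrite author's own statement) =====
-- stated objective: alternative
-- what changed: Replaced A's indexed range loop with cur_i tracking and BGC[cur_i:i] slices by a suffix-rewriting while loop: drop a removable head, otherwise peel off the maximal non-removable run as the next segment (a span/takeWhile-dropWhile decomposition, no indices or slices by position).
import Mathlib
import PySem

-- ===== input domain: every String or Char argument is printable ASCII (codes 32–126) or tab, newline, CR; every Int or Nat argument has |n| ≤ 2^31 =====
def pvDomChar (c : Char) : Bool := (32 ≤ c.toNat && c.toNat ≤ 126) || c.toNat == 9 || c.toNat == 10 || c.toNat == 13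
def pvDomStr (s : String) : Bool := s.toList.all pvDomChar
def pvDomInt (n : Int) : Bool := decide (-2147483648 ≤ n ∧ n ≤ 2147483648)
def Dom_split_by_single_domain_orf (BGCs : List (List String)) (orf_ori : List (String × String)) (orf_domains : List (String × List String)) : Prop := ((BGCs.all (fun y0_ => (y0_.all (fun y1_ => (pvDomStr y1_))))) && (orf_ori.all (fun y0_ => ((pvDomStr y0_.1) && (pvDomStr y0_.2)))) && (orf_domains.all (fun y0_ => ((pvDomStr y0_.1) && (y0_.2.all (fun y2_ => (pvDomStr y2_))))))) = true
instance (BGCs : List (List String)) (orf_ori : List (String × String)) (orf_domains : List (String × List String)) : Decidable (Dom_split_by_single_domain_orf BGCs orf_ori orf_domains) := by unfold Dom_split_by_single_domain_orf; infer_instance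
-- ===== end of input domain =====

-- B replaces A's indexed range loop with cur_i tracking and positional slices by a
-- suffix-rewriting while loop (drop removable head / peel the maximal non-removable run);
-- same cost, a different decomposition.

-- ===== PORT A =====
-- A's inner helper is_removable; orf_domains[orf] raises KeyError on a missing key (excluded by Pre_),
-- so under Pre_ the getD [] default is never used.
def pvRemovableA (orf_domains : List (String × List String)) (orf : String) : Bool :=
  let ds := ((PySem.Dict.mk orf_domains).get? orf).getD []
  if ds.length == 2 && ds.contains "A" && ds.contains "PCP" then true
  else if ds.length == 1 then true
  else false

def split_by_single_domain_orf (BGCs : List (List String)) (orf_ori : List (String × String)) (orf_domains : List (String × List String)) : List (List String) :=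
  BGCs.foldl (fun res_bgcs BGC =>
    let st := (PySem.List.pyRange 0 (BGC.length : Int)).foldl
      (fun (st : Int × List (List String)) i =>
        let orf := PySem.List.pyGetD BGC i ""
        if pvRemovableA orf_domains orf then
          (i + 1, if i ≠ st.1 then st.2 ++ [PySem.List.slice BGC (some st.1) (some i)] else st.2)
        else st) (0, res_bgcs)
    if st.1 ≠ (BGC.length : Int) then st.2 ++ [PySem.List.slice BGC (some st.1) (some (BGC.length : Int))] else st.2) []

-- ===== PORT B =====
-- B's is_removable, written as one boolean expression (same KeyError domain as A's).
def pvRemovableB (orf_domains : List (String × List String)) (orf : String) : Bool :=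
  let ds := ((PySem.Dict.mk orf_domains).get? orf).getD []
  ds.length == 1 || (ds.length == 2 && ds.contains "A" && ds.contains "PCP")

-- the `while rest:` loop of Source B, recursing on the shrinking suffix `rest`; the inner
-- `while rest and not is_removable(rest[0])` span is takeWhile/dropWhile of the suffix.
def pvSegsLoop (r : String → Bool) : List String → List (List String) → List (List String)
  | [], res => res
  | x :: xs, res =>
    if r x then pvSegsLoop r xs res
    else pvSegsLoop r ((x :: xs).dropWhile (fun y => !r y))
           (res ++ [(x :: xs).takeWhile (fun y => !r y)])
termination_by rest _ => rest.length
decreasing_by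
  · simp
  · rename_i h
    have hx : (!r x) = true := by simp [h]
    have := List.length_dropWhile_le (fun y => !r y) xs
    simp [hx]
    omega

def split_by_single_domain_orf_alt (BGCs : List (List String)) (orf_ori : List (String × String)) (orf_domains : List (String × List String)) : List (List String) :=
  BGCs.foldl (fun res BGC => pvSegsLoop (pvRemovableB orf_domains) BGC res) []

-- ===== PRECONDITION & SPEC =====
-- Pre_ excludes exactly the inputs where some orf of a BGC is not a key of orf_domains:
-- there Python A raises KeyError (no value is returned).
def Pre_split_by_single_domain_orf (BGCs : List (List String)) (orf_ori : List (String × String)) (orf_domains : List (String × List String)) : Prop :=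
  ∀ BGC ∈ BGCs, ∀ orf ∈ BGC, (((PySem.Dict.mk orf_domains).get? orf).isSome = true)
instance (BGCs : List (List String)) (orf_ori : List (String × String)) (orf_domains : List (String × List String)) : Decidable (Pre_split_by_single_domain_orf BGCs orf_ori orf_domains) := by unfold Pre_split_by_single_domain_orf; infer_instance

def pvWitness_split_by_single_domain_orf : List (List String) × (List (String × String)) × (List (String × List String)) :=
  ([["a", "b", "c"], ["b"]], [("a", "+")], [("a", ["A", "PCP"]), ("b", ["C", "A", "E"]), ("c", ["C"])])

def Spec_split_by_single_domain_orf (BGCs : List (List String)) (orf_ori : List (String × String)) (orf_domains : List (String × List String)) (out : List (List String)) : Prop := out = split_by_single_domain_orf_alt BGCs orf_ori orf_domains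
instance (BGCs : List (List String)) (orf_ori : List (String × String)) (orf_domains : List (String × List String)) (out : List (List String)) : Decidable (Spec_split_by_single_domain_orf BGCs orf_ori orf_domains out) := by unfold Spec_split_by_single_domain_orf; infer_instance

-- ===== CLAIM (what is proved, stated in full; the proofs are below) =====
def Claim_equal_split_by_single_domain_orf : Prop := ∀ (BGCs : List (List String)) (orf_ori : List (String × String)) (orf_domains : List (String × List String)), Dom_split_by_single_domain_orf BGCs orf_ori orf_domains → Pre_split_by_single_domain_orf BGCs orf_ori orf_domains → Spec_split_by_single_domain_orf BGCs orf_ori orf_domains (split_by_single_domain_orf BGCs orf_ori orf_domains)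

-- ===== LEMMAS AND PROOFS =====

theorem pvWitness_ok : Dom_split_by_single_domain_orf (pvWitness_split_by_single_domain_orf.1) (pvWitness_split_by_single_domain_orf.2.1) (pvWitness_split_by_single_domain_orf.2.2) ∧ Pre_split_by_single_domain_orf (pvWitness_split_by_single_domain_orf.1) (pvWitness_split_by_single_domain_orf.2.1) (pvWitness_split_by_single_domain_orf.2.2) := by
  constructor <;> decide

theorem pvRemovable_eq (orf_domains : List (String × List String)) (orf : String) :
    pvRemovableA orf_domains orf = pvRemovableB orf_domains orf := by
  unfold pvRemovableA pvRemovableB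
  have hbeq : ∀ n m : ℕ, (n == m) = decide (n = m) := fun n m => by
    by_cases h : n = m <;> simp [h]
  set ds := ((PySem.Dict.mk orf_domains).get? orf).getD [] with hds
  cases h2 : (ds.length == 2 && ds.contains "A" && ds.contains "PCP") <;>
    cases h1 : (ds.length == 1) <;> simp [h1] <;> rw [hbeq]

-- The common intermediate form: A's loop with cur as the pending (already scanned) segment.
def pvGo (r : String → Bool) (cur : List String) (segs : List (List String)) : List String → List (List String)
  | [] => if cur ≠ [] then segs ++ [cur] else segs
  | x :: xs =>
    if r x then (if cur ≠ [] then pvGo r [] (segs ++ [cur]) xs else pvGo r cur segs xs)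
    else pvGo r (cur ++ [x]) segs xs

def pvStepA (r : String → Bool) (L : List String) (st : Int × List (List String)) (i : Int) : Int × List (List String) :=
  if r (PySem.List.pyGetD L i "") then
    (i + 1, if i ≠ st.1 then st.2 ++ [PySem.List.slice L (some st.1) (some i)] else st.2)
  else st

def pvFlushA (L : List String) (st : Int × List (List String)) : List (List String) :=
  if st.1 ≠ (L.length : Int) then st.2 ++ [PySem.List.slice L (some st.1) (some (L.length : Int))] else st.2

theorem pvA_inner (r : String → Bool) :
    ∀ (rest L : List String) (c k : ℕ) (segs : List (List String)),
      L.drop k = rest → c ≤ k → k ≤ L.length →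
      pvFlushA L ((PySem.List.pyRange (k : Int) (L.length : Int)).foldl (pvStepA r L) ((c : Int), segs))
      = pvGo r (List.take (k - c) (List.drop c L)) segs rest := by
  intro rest
  induction rest with
  | nil =>
    intro L c k segs hdrop hck hk
    have hkL : k = L.length := by
      have := List.drop_eq_nil_iff.mp hdrop; omega
    subst hkL
    rw [PySem.List.pyRange_one_eq_nil (le_refl _)]
    simp only [List.foldl_nil]
    by_cases hc : c = L.length
    · subst hc; simp [pvGo, pvFlushA, List.drop_length]
    · have hne : ((c : Int)) ≠ (L.length : Int) := by exact_mod_cast hc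
      have hcur : (List.take (L.length - c) (List.drop c L)) ≠ [] := by
        have hl : (List.take (L.length - c) (List.drop c L)).length = L.length - c := by
          simp [List.length_take, List.length_drop]
        intro h0; rw [h0] at hl; simp at hl; omega
      simp [pvGo, pvFlushA, hne, hcur, PySem.List.slice_natCast]
  | cons x xs ih =>
    intro L c k segs hdrop hck hk
    have hkL : k < L.length := by
      by_contra h
      rw [List.drop_eq_nil_iff.mpr (by omega)] at hdrop; exact (List.cons_ne_nil _ _) hdrop.symm
    have hgetk : L[k]? = some x := by
      have h0 : (L.drop k)[0]? = some x := by rw [hdrop]; rfl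
      rw [List.getElem?_drop] at h0; simpa using h0
    have hx : L.getD k "" = x := by
      simp [List.getD_eq_getElem?_getD, hgetk]
    have hrange : PySem.List.pyRange (k : Int) (L.length : Int) = (k : Int) :: PySem.List.pyRange ((k : Int) + 1) (L.length : Int) := PySem.List.pyRange_one_cons (by exact_mod_cast hkL)
    rw [hrange]
    simp only [List.foldl_cons, pvStepA, PySem.List.pyGetD_natCast, hx]
    have hdrop' : L.drop (k + 1) = xs := by
      have h2 : L.drop (k + 1) = (L.drop k).drop 1 := by
        rw [List.drop_drop, Nat.add_comm]
      rw [h2, hdrop]; rfl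
    have hcast : ((k : Int) + 1) = ((k + 1 : ℕ) : Int) := by push_cast; ring
    by_cases hr : r x
    · simp only [hr, if_true]
      by_cases hc : c = k
      · subst hc
        rw [if_neg (show ¬((c : Int) ≠ (c : Int)) by simp)]
        rw [hcast]
        have hih := ih L (c + 1) (c + 1) segs hdrop' (le_refl _) (by omega)
        simp only [Nat.sub_self, List.take_zero] at hih
        rw [hih]
        simp [pvGo, hr]
      · have hne : ((k : Int)) ≠ (c : Int) := by exact_mod_cast Ne.symm hc
        rw [if_pos (show ((k : Int) ≠ (c : Int)) from hne)]
        rw [hcast]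
        have hih := ih L (k + 1) (k + 1) (segs ++ [PySem.List.slice L (some (c : Int)) (some (k : Int))]) hdrop' (le_refl _) (by omega)
        simp only [Nat.sub_self, List.take_zero] at hih
        rw [hih]
        have hcur : (List.take (k - c) (List.drop c L)) ≠ [] := by
          have hl : (List.take (k - c) (List.drop c L)).length = min (k - c) (L.length - c) := by
            simp [List.length_take, List.length_drop]
          intro h0; rw [h0] at hl; simp at hl; omega
        simp [pvGo, hr, hcur, PySem.List.slice_natCast]
    · rw [if_neg (by simp [hr] : ¬ (r x = true))]
      rw [hcast]
      have hih := ih L c (k + 1) segs hdrop' (by omega) (by omega)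
      rw [hih]
      have hlen : k - c < (L.drop c).length := by simp [List.length_drop]; omega
      have htake : List.take (k + 1 - c) (List.drop c L) = List.take (k - c) (List.drop c L) ++ [x] := by
        have hget : (L.drop c)[k - c]? = some x := by
          rw [List.getElem?_drop]
          have hckk : c + (k - c) = k := by omega
          rw [hckk, hgetk]
        have hkc : k + 1 - c = (k - c) + 1 := by omega
        rw [hkc, List.take_add_one, hget]
        rfl
      rw [htake]
      simp [pvGo, hr]

-- pvGo with empty pending segment is exactly B's suffix loop (proved jointly with the
-- nonempty-pending case, which corresponds to B's inner span already having consumed cur).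
theorem pvSegsLoop_cons (r : String → Bool) (x : String) (xs : List String) (res : List (List String)) :
    pvSegsLoop r (x :: xs) res =
      if r x then pvSegsLoop r xs res
      else pvSegsLoop r ((x :: xs).dropWhile (fun y => !r y))
             (res ++ [(x :: xs).takeWhile (fun y => !r y)]) := by
  rw [pvSegsLoop]

theorem pvGo_segsLoop (r : String → Bool) :
    ∀ xs : List String,
      (∀ segs, pvGo r [] segs xs = pvSegsLoop r xs segs) ∧
      (∀ cur segs, cur ≠ [] →
        pvGo r cur segs xs
          = pvSegsLoop r (xs.dropWhile (fun y => !r y))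
              (segs ++ [cur ++ xs.takeWhile (fun y => !r y)])) := by
  intro xs
  induction xs with
  | nil =>
    refine ⟨fun segs => by simp [pvGo, pvSegsLoop], fun cur segs hc => ?_⟩
    simp [pvGo, pvSegsLoop, hc]
  | cons x xs ih =>
    constructor
    · intro segs
      by_cases hr : r x
      · have hgo : pvGo r [] segs (x :: xs) = pvGo r [] segs xs := by simp [pvGo, hr]
        rw [hgo, ih.1 segs, pvSegsLoop_cons, if_pos hr]
      · have hgo : pvGo r [] segs (x :: xs) = pvGo r [x] segs xs := by simp [pvGo, hr]
        rw [hgo, ih.2 [x] segs (by simp), pvSegsLoop_cons, if_neg hr]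
        simp [hr]
    · intro cur segs hc
      by_cases hr : r x
      · have hgo : pvGo r cur segs (x :: xs) = pvGo r [] (segs ++ [cur]) xs := by
          simp [pvGo, hr, hc]
        have hd : List.dropWhile (fun y => !r y) (x :: xs) = x :: xs := by
          simp [hr]
        have ht : List.takeWhile (fun y => !r y) (x :: xs) = [] := by
          simp [hr]
        rw [hgo, ih.1 (segs ++ [cur]), hd, ht, List.append_nil, pvSegsLoop_cons, if_pos hr]
      · have hgo : pvGo r cur segs (x :: xs) = pvGo r (cur ++ [x]) segs xs := by
          simp [pvGo, hr]
        have hd : List.dropWhile (fun y => !r y) (x :: xs) = List.dropWhile (fun y => !r y) xs := by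
          simp [hr]
        have ht : List.takeWhile (fun y => !r y) (x :: xs) = x :: List.takeWhile (fun y => !r y) xs := by
          simp [hr]
        rw [hgo, ih.2 (cur ++ [x]) segs (by simp), hd, ht]
        simp

theorem pvPorts_eq (BGCs : List (List String)) (orf_ori : List (String × String)) (orf_domains : List (String × List String)) :
    split_by_single_domain_orf BGCs orf_ori orf_domains = split_by_single_domain_orf_alt BGCs orf_ori orf_domains := by
  unfold split_by_single_domain_orf split_by_single_domain_orf_alt
  rw [show pvRemovableB orf_domains = pvRemovableA orf_domains from
    (funext (pvRemovable_eq orf_domains)).symm]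
  suffices h : ∀ (res : List (List String)),
      BGCs.foldl (fun res_bgcs BGC =>
        let st := (PySem.List.pyRange 0 (BGC.length : Int)).foldl
          (fun (st : Int × List (List String)) i =>
            let orf := PySem.List.pyGetD BGC i ""
            if pvRemovableA orf_domains orf then
              (i + 1, if i ≠ st.1 then st.2 ++ [PySem.List.slice BGC (some st.1) (some i)] else st.2)
            else st) (0, res_bgcs)
        if st.1 ≠ (BGC.length : Int) then st.2 ++ [PySem.List.slice BGC (some st.1) (some (BGC.length : Int))] else st.2) res
      = BGCs.foldl (fun res BGC => pvSegsLoop (pvRemovableA orf_domains) BGC res) res from h []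
  induction BGCs with
  | nil => intro res; rfl
  | cons L Ls ih =>
    intro res
    simp only [List.foldl_cons]
    have hA : pvFlushA L ((PySem.List.pyRange ((0 : ℕ) : Int) (L.length : Int)).foldl (pvStepA (pvRemovableA orf_domains) L) (((0 : ℕ) : Int), res))
        = pvGo (pvRemovableA orf_domains) (List.take (0 - 0) (List.drop 0 L)) res L :=
      pvA_inner (pvRemovableA orf_domains) L L 0 0 res (by simp) (le_refl _) (by omega)
    simp only [Nat.cast_zero, Nat.sub_self, List.take_zero, List.drop_zero] at hA
    have hstep : (let st := ((PySem.List.pyRange 0 (L.length : Int)).foldl (fun (st : Int × List (List String)) i => let orf := PySem.List.pyGetD L i ""; if pvRemovableA orf_domains orf then (i + 1, if i ≠ st.1 then st.2 ++ [PySem.List.slice L (some st.1) (some i)] else st.2) else st) (0, res)); if st.1 ≠ (L.length : Int) then st.2 ++ [PySem.List.slice L (some st.1) (some (L.length : Int))] else st.2) = pvFlushA L ((PySem.List.pyRange 0 (L.length : Int)).foldl (pvStepA (pvRemovableA orf_domains) L) (0, res)) := rfl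
    rw [hstep, hA, (pvGo_segsLoop (pvRemovableA orf_domains) L).1 res]
    exact ih _

-- ===== VERDICT (by name: the statement is the Claim_ definition above) =====
theorem split_by_single_domain_orf_spec : Claim_equal_split_by_single_domain_orf := by
  intro BGCs orf_ori orf_domains _ _
  unfold Spec_split_by_single_domain_orf
  exact pvPorts_eq BGCs orf_ori orf_domains
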